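-- pv_equiv track=rewrite | github.com/CDMY0417/Tool_MATH | function_tools/function_total/0e1si5.py | roots_ending_in_digits
-- ===== SOURCE A (Python) =====
-- def roots_ending_in_digits(limit: int, digits: list[int]) -> list[int]:
--     roots = []
--     i = 1
--     while i < limit:
--         if i % 10 in digits:
--             roots.append(i)
--         i += 1
--     return roots
-- ===== SOURCE B (Python) =====
-- def roots_ending_in_digits(limit: int, digits: list[int]) -> list[int]:
--     offsets = sorted(set(d for d in digits if 0 <= d <= 9))
--     roots = []
--     base = 0
--     while base < limit:
--         for d in offsets:
--             v = base + d
--             if 1 <= v < limit: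
--                 roots.append(v)
--         base += 10
--     return roots
-- ===== Notes on version B (the rewrite author's own statement) =====
-- stated objective: faster
-- what changed: Replaces the per-integer 'i % 10 in digits' list scan with a sorted set of valid last digits computed once and a block loop over bases 0,10,20,... that emits base+d directly, removing every modulo and list-membership test from the per-element work.
import Mathlib
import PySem

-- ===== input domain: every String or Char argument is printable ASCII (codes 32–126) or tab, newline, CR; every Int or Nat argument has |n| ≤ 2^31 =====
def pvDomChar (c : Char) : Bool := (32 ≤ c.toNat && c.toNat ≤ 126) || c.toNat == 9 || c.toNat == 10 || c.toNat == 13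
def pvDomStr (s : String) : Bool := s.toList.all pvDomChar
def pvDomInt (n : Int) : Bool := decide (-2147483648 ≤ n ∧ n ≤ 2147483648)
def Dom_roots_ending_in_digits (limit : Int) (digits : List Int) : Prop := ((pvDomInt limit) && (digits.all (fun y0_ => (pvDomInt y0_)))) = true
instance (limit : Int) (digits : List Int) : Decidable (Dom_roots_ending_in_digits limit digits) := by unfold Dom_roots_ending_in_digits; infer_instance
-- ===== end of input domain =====

-- B replaces the per-integer modulo/membership test with a sorted set of valid
-- last digits and a block loop over bases 0,10,20,... (objective: alternative).


-- ===== PORT A =====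
-- while i < limit: if i % 10 in digits: roots.append(i); i += 1
def rootsALoop (limit : Int) (digits : List Int) (i : Int) (roots : List Int) : List Int :=
  if _h : i < limit then
    rootsALoop limit digits (i + 1)
      (if digits.contains (PySem.Int.mod i 10) then roots ++ [i] else roots)
  else roots
termination_by (limit - i).toNat
decreasing_by omega

def roots_ending_in_digits (limit : Int) (digits : List Int) : List Int :=
  rootsALoop limit digits 1 []

-- ===== PORT B =====
-- for d in offsets: v = base + d; if 1 <= v < limit: roots.append(v)
def rootsBInner (limit base : Int) (offsets roots : List Int) : List Int :=
  offsets.foldl (fun acc d => if 1 ≤ base + d ∧ base + d < limit then acc ++ [base + d] else acc) roots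

-- while base < limit: <inner loop>; base += 10
def rootsBLoop (limit : Int) (offsets : List Int) (base : Int) (roots : List Int) : List Int :=
  if _h : base < limit then
    rootsBLoop limit offsets (base + 10) (rootsBInner limit base offsets roots)
  else roots
termination_by (limit - base).toNat
decreasing_by omega

def roots_ending_in_digits_alt (limit : Int) (digits : List Int) : List Int :=
  let offsets := PySem.List.sorted (PySem.Set.ofList (digits.filter (fun d => decide (0 ≤ d) && decide (d ≤ 9)))) (fun x => x) false
  rootsBLoop limit offsets 0 []

-- ===== PRECONDITION & SPEC =====
def Spec_roots_ending_in_digits (limit : Int) (digits : List Int) (out : List Int) : Prop := out = roots_ending_in_digits_alt limit digits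
instance (limit : Int) (digits : List Int) (out : List Int) : Decidable (Spec_roots_ending_in_digits limit digits out) := by unfold Spec_roots_ending_in_digits; infer_instance

-- ===== CLAIM (what is proved, stated in full; the proofs are below) =====
def Claim_equal_roots_ending_in_digits : Prop := ∀ (limit : Int) (digits : List Int), Dom_roots_ending_in_digits limit digits → Spec_roots_ending_in_digits limit digits (roots_ending_in_digits limit digits)

-- ===== LEMMAS AND PROOFS =====

-- A's loop is the filter of the range [i, limit).
theorem rootsALoop_eq (limit : Int) (digits : List Int) :
    ∀ (i : Int) (roots : List Int),
      rootsALoop limit digits i roots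
        = roots ++ (PySem.List.pyRange i limit 1).filter (fun x => digits.contains (PySem.Int.mod x 10)) := by
  intro i roots
  by_cases h : i < limit
  · rw [rootsALoop, dif_pos h, rootsALoop_eq limit digits (i + 1),
      PySem.List.pyRange_one_cons h, List.filter_cons]
    simp only [List.contains_iff_mem]
    split_ifs <;> simp
  · rw [rootsALoop, dif_neg h, PySem.List.pyRange_one_eq_nil (by omega)]
    simp
termination_by i _ => (limit - i).toNat
decreasing_by omega

-- Two strictly increasing integer lists with the same members are equal.
theorem eq_of_mem_iff_pairwise_lt (l₁ l₂ : List Int)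
    (h₁ : l₁.Pairwise (· < ·)) (h₂ : l₂.Pairwise (· < ·))
    (hm : ∀ x, x ∈ l₁ ↔ x ∈ l₂) : l₁ = l₂ := by
  have hp : l₁.Perm l₂ := by
    rw [List.perm_ext_iff_of_nodup (h₁.imp fun h => ne_of_lt h) (h₂.imp fun h => ne_of_lt h)]
    exact hm
  exact hp.eq_of_pairwise (fun a b _ _ h1 h2 => absurd h2 (lt_asymm h1)) h₁ h₂

-- The block at 'base' emitted by B's inner loop is exactly the filtered subrange.
theorem block_eq (limit base : Int) (offsets : List Int)
    (hps : offsets.Pairwise (· < ·)) (hrg : ∀ d ∈ offsets, 0 ≤ d ∧ d < 10)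
    (h0 : 0 ≤ base) (hmod : base % 10 = 0) :
    (offsets.filter (fun d => decide (1 ≤ base + d ∧ base + d < limit))).map (fun d => base + d)
      = (PySem.List.pyRange (max 1 base) (min (base + 10) limit) 1).filter
          (fun x => offsets.contains (PySem.Int.mod x 10)) := by
  apply eq_of_mem_iff_pairwise_lt
  · exact (List.pairwise_map).2 ((hps.filter _).imp (by intro a b hab; omega))
  · exact (PySem.List.pairwise_lt_pyRange_one _ _).filter _
  · intro x
    simp only [List.mem_map, List.mem_filter, PySem.List.mem_pyRange_one, decide_eq_true_eq,
      List.contains_iff_mem]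
    constructor
    · rintro ⟨d, ⟨hd, h1, h2⟩, rfl⟩
      obtain ⟨hd0, hd10⟩ := hrg d hd
      have : PySem.Int.mod (base + d) 10 = d := by
        rw [PySem.Int.mod_eq_emod_of_pos (by norm_num)]; omega
      refine ⟨⟨by omega, by omega⟩, ?_⟩
      rw [this]; exact hd
    · rintro ⟨⟨hlo, hhi⟩, hmem⟩
      have hm10 : PySem.Int.mod x 10 = x % 10 := PySem.Int.mod_eq_emod_of_pos (by norm_num)
      obtain ⟨hd0, hd10⟩ := hrg _ hmem
      rw [hm10] at hmem hd0 hd10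
      refine ⟨x % 10, ⟨?_, by omega, by omega⟩, by omega⟩
      have : x % 10 = x - base := by omega
      rw [← hm10, hm10, this] at hmem ⊢
      exact hmem

-- B's inner loop is appending the mapped filtered offsets.
theorem rootsBInner_eq (limit base : Int) (offsets roots : List Int) :
    rootsBInner limit base offsets roots
      = roots ++ (offsets.filter (fun d => decide (1 ≤ base + d ∧ base + d < limit))).map (fun d => base + d) := by
  unfold rootsBInner
  induction offsets generalizing roots with
  | nil => simp
  | cons d tl ih =>
    simp only [List.foldl_cons, List.filter_cons]
    by_cases h : 1 ≤ base + d ∧ base + d < limit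
    · rw [if_pos h, ih]; simp [h]
    · rw [if_neg h, ih]; simp [h]

-- B's outer loop produces the filter of the range [max 1 base, limit).
theorem rootsBLoop_eq (limit : Int) (offsets : List Int)
    (hps : offsets.Pairwise (· < ·)) (hrg : ∀ d ∈ offsets, 0 ≤ d ∧ d < 10) :
    ∀ (base : Int) (roots : List Int), 0 ≤ base → base % 10 = 0 →
      rootsBLoop limit offsets base roots
        = roots ++ (PySem.List.pyRange (max 1 base) limit 1).filter
            (fun x => offsets.contains (PySem.Int.mod x 10)) := by
  intro base roots h0 hmod
  by_cases h : base < limit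
  · rw [rootsBLoop, dif_pos h,
      rootsBLoop_eq limit offsets hps hrg (base + 10) _ (by omega) (by omega),
      rootsBInner_eq]
    have hb : max 1 (base + 10) = base + 10 := by omega
    rw [hb, List.append_assoc, block_eq limit base offsets hps hrg h0 hmod]
    congr 1
    by_cases hcase : base + 10 ≤ limit
    · rw [min_eq_left hcase, ← List.filter_append,
        ← PySem.List.pyRange_one_append (max 1 base) (base + 10) limit (by omega) hcase]
    · rw [min_eq_right (by omega),
        PySem.List.pyRange_one_eq_nil (show limit ≤ base + 10 by omega)]
      simp
  · rw [rootsBLoop, dif_neg h, PySem.List.pyRange_one_eq_nil (by omega)]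
    simp
termination_by base _ => (limit - base).toNat
decreasing_by omega

-- Membership in the sorted valid-digit set coincides with membership in digits, for values in [0,10).
theorem contains_offsets_eq (digits : List Int) (x : Int) :
    (PySem.List.sorted (PySem.Set.ofList (digits.filter (fun d => decide (0 ≤ d) && decide (d ≤ 9)))) (fun x => x) false).contains (PySem.Int.mod x 10)
      = digits.contains (PySem.Int.mod x 10) := by
  have hm10 : PySem.Int.mod x 10 = x % 10 := PySem.Int.mod_eq_emod_of_pos (by norm_num)
  have h0 : 0 ≤ x % 10 := Int.emod_nonneg x (by norm_num)
  have h10 : x % 10 < 10 := Int.emod_lt_of_pos x (by norm_num)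
  rw [Bool.eq_iff_iff]
  simp only [List.contains_iff_mem, hm10, PySem.List.mem_sorted, PySem.Set.mem_ofList,
    List.mem_filter, decide_eq_true_eq, Bool.and_eq_true]
  constructor
  · rintro ⟨hmem, _⟩; exact hmem
  · intro hmem; exact ⟨hmem, by omega⟩

theorem offsets_pairwise (digits : List Int) :
    (PySem.List.sorted (PySem.Set.ofList (digits.filter (fun d => decide (0 ≤ d) && decide (d ≤ 9)))) (fun x => x) false).Pairwise (· < ·) :=
  PySem.List.sorted_ofList_pairwise_lt _

theorem offsets_range (digits : List Int) :
    ∀ d ∈ PySem.List.sorted (PySem.Set.ofList (digits.filter (fun d => decide (0 ≤ d) && decide (d ≤ 9)))) (fun x => x) false, 0 ≤ d ∧ d < 10 := by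
  intro d hd
  simp only [PySem.List.mem_sorted, PySem.Set.mem_ofList, List.mem_filter,
    Bool.and_eq_true, decide_eq_true_eq] at hd
  omega

-- ===== VERDICT (by name: the statement is the Claim_ definition above) =====
theorem roots_ending_in_digits_spec : Claim_equal_roots_ending_in_digits := by
  intro limit digits _
  unfold Spec_roots_ending_in_digits roots_ending_in_digits roots_ending_in_digits_alt
  rw [rootsALoop_eq, rootsBLoop_eq limit _ (offsets_pairwise digits) (offsets_range digits) 0 [] le_rfl rfl]
  simp only [List.nil_append]
  have : (max 1 (0 : Int)) = 1 := by omega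
  rw [this]
  exact List.filter_congr (fun x _ => (contains_offsets_eq digits x).symm)
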